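-- pv_equiv track=rewrite | github.com/DaSESmartEdu/PGKPR | Data/switchpos.py | word_to_index
-- ===== SOURCE A (Python) =====
-- def word_to_index(sen, kw):
--     sen = sen.strip().split(" ")
--     index = []
--     kw = list(set(kw))
--     for item in kw:
--         for idx, word in enumerate(sen):
--             if item == word:
--                 index.append(idx)
--     if not index:
--         index = [-1]
--     index = sorted(index)
--     return " ".join([str(i) for i in index])
-- ===== SOURCE B (Python) =====
-- def word_to_index(sen, kw):
--     pos_map = {}
--     for idx, word in enumerate(sen.strip().split(" ")):
--         pos_map.setdefault(word, []).append(idx)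
--     index = []
--     for item in set(kw):
--         index.extend(pos_map.get(item, []))
--     index = sorted(index)
--     if not index:
--         index = [-1]
--     return " ".join(str(i) for i in index)
-- ===== Notes on version B (the rewrite author's own statement) =====
-- stated objective: alternative
-- what changed: Replaces A's rescan of the whole sentence for every distinct keyword by one pass that builds an inverted index (word -> list of positions); the keyword loop then just concatenates dictionary lookups, so no inner scan of the sentence remains.
import Mathlib
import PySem

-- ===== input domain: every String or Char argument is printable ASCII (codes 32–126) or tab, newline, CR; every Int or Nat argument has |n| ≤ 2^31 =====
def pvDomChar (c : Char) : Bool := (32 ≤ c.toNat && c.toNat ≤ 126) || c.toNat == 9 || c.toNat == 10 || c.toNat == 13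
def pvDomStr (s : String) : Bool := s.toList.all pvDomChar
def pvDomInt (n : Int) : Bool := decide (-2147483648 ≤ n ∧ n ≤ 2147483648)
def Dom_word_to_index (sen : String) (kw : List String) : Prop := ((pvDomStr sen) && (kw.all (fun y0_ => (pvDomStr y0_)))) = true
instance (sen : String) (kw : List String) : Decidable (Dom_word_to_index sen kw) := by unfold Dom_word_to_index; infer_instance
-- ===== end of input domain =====

-- B builds an inverted index (word -> positions) in one pass over the sentence, then the
-- keyword loop concatenates dictionary lookups instead of rescanning the sentence per keyword.

-- ===== PORT A =====
def word_to_index (sen : String) (kw : List String) : String :=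
  let sen' := (PySem.Str.split? (PySem.Str.strip sen) " ").getD []
  let kw' := PySem.Set.ofList kw
  let index := kw'.foldl (fun acc item =>
    (PySem.List.enumerate sen' 0).foldl
      (fun acc p => if item == p.2 then acc ++ [p.1] else acc) acc) ([] : List Int)
  let index := if index = [] then [(-1 : Int)] else index
  let index := PySem.List.sorted index (fun x => x) false
  PySem.Str.join " " (index.map PySem.Int.toStr)

-- ===== PORT B =====
def word_to_index_alt (sen : String) (kw : List String) : String :=
  let posMap : PySem.Dict String (List Int) :=
    (PySem.List.enumerate ((PySem.Str.split? (PySem.Str.strip sen) " ").getD []) 0).foldl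
      (fun d p => d.modify p.2 [] (· ++ [p.1])) PySem.Dict.empty
  let index := (PySem.Set.ofList kw).foldl
      (fun acc item => acc ++ posMap.getD item []) ([] : List Int)
  let index := PySem.List.sorted index (fun x => x) false
  let index := if index = [] then [(-1 : Int)] else index
  PySem.Str.join " " (index.map PySem.Int.toStr)

-- ===== PRECONDITION & SPEC =====
def Spec_word_to_index (sen : String) (kw : List String) (out : String) : Prop := out = word_to_index_alt sen kw
instance (sen : String) (kw : List String) (out : String) : Decidable (Spec_word_to_index sen kw out) := by unfold Spec_word_to_index; infer_instance

-- ===== CLAIM =====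
def Claim_equal_word_to_index : Prop := ∀ (sen : String) (kw : List String), Dom_word_to_index sen kw → Spec_word_to_index sen kw (word_to_index sen kw)

-- ===== LEMMAS AND PROOFS =====

-- the inverted index looked up at `item` is exactly what A's inner scan appends for `item`
theorem pv_lookup (es : List (Int × String)) (item : String) :
    ((es.foldl (fun d p => d.modify p.2 [] (· ++ [p.1]))
        (PySem.Dict.empty : PySem.Dict String (List Int))).getD item [])
      = (es.filter fun p => item == p.2).map (·.1) := by
  have h : es.foldl (fun d p => d.modify p.2 [] (· ++ [p.1]))
        (PySem.Dict.empty : PySem.Dict String (List Int))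
      = (es.map (fun p => (p.2, p.1))).foldl
        (fun d q => d.modify q.1 [] (· ++ [q.2])) PySem.Dict.empty := by
    rw [List.foldl_map]
  rw [h, PySem.Dict.getD_foldl_modify_append, PySem.Dict.getD_empty, List.nil_append,
    List.filter_map, List.map_map]
  have hp : ((fun q : String × Int => q.1 == item) ∘ fun p : Int × String => (p.2, p.1))
      = fun p : Int × String => item == p.2 := by
    funext p; simp [eq_comm]
  rw [hp]
  exact List.map_congr_left (fun a _ => rfl)

theorem pv_acc (ks : List String) (es : List (Int × String)) (acc : List Int) :
    ks.foldl (fun acc item =>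
        es.foldl (fun acc p => if item == p.2 then acc ++ [p.1] else acc) acc) acc
      = ks.foldl (fun acc item =>
          acc ++ ((es.foldl (fun d p => d.modify p.2 [] (· ++ [p.1]))
            (PySem.Dict.empty : PySem.Dict String (List Int))).getD item [])) acc := by
  induction ks generalizing acc with
  | nil => rfl
  | cons k t ih =>
    simp only [List.foldl_cons]
    rw [PySem.List.foldl_append_if, pv_lookup, ih]

-- ===== VERDICT =====
theorem word_to_index_spec : Claim_equal_word_to_index := by
  intro sen kw _
  unfold Spec_word_to_index word_to_index word_to_index_alt
  simp only []
  rw [pv_acc]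
  set idx := (PySem.Set.ofList kw).foldl (fun acc item =>
      acc ++ ((PySem.List.enumerate ((PySem.Str.split? (PySem.Str.strip sen) " ").getD []) 0).foldl
        (fun d p => d.modify p.2 [] (· ++ [p.1]))
        (PySem.Dict.empty : PySem.Dict String (List Int))).getD item []) ([] : List Int) with hidx
  by_cases h : idx = []
  · rw [h]; rfl
  · simp only [if_neg h]
    rw [if_neg (by simpa [PySem.List.sorted_eq_nil_iff] using h)]
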